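-- pv_equiv track=rewrite | github.com/pypi-data/pypi-mirror-286 | packages/kStatistics/kStatistics-1.0.tar.gz/kStatistics-1.0/kStatistics/main.py | mCoeff
-- ===== SOURCE A (Python) =====
-- from itertools import permutations, chain
--
-- def mCoeff(v=None, L=None):
--     if v is None:
--         raise ValueError("Le premier paramètre est manquant")
--     if L is None:
--         raise ValueError("Le deuxième paramètre est manquant")
--
--     def is_equal(v1, v2):
--         """Check if two values or lists are equal, handling nested lists."""
--         if isinstance(v1, list) and isinstance(v2, list):
--             if all(isinstance(item, int) for item in v1) and all(isinstance(item, int) for item in v2):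
--                 # Both v1 and v2 are lists of integers, no need to check permutations
--                 return v1 == v2
--             else:
--                 if len(v1) != len(v2):
--                     return False
--
--                 # Check all permutations of v1 against v2
--                 for perm in permutations(v1):
--                     if all(is_equal(perm[i], v2[i]) for i in range(len(v1))):
--                         return True
--                 return False
--
--         return v1 == v2
--
--     for u in L:
--         if is_equal(v, u[0]):
--             return u[1]
--
--     return 0
-- ===== SOURCE B (Python) =====
-- def mCoeff(v=None, L=None):
--     if v is None:
--         raise ValueError("Le premier paramètre est manquant")
--     if L is None:
--         raise ValueError("Le deuxième paramètre est manquant")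
--     key = sorted(v)
--     for m, c in L:
--         if sorted(m) == key:
--             return c
--     return 0
-- ===== Notes on version B (the rewrite author's own statement) =====
-- stated objective: alternative
-- what changed: Replaces A's per-entry search over all permutations of v with canonicalization: sort v once and compare it with each entry's sorted key, scanning L once.
import Mathlib
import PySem

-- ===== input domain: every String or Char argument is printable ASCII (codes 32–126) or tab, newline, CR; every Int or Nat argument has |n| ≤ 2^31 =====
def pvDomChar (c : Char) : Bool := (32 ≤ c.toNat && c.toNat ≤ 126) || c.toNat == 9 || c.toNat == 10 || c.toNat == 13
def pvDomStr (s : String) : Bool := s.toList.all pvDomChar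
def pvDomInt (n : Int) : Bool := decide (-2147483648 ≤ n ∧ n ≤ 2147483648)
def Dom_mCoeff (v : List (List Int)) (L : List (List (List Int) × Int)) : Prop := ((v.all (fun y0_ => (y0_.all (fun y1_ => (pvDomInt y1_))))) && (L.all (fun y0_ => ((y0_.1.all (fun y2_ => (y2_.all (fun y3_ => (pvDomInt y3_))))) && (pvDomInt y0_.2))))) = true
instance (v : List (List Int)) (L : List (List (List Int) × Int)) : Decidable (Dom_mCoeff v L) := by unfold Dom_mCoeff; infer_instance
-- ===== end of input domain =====

-- B sorts v once and compares canonical (sorted) forms, instead of A's search over all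
-- permutations of v for every entry of L (objective: alternative algorithm).

-- ===== PORT A =====
-- is_equal specialised to this task's type: v1, v2 : list[list[int]].  The items are lists,
-- never ints, so 'all(isinstance(item, int) …)' is the literal 'all items satisfy False',
-- true exactly on the empty list; the recursive inner call is_equal(perm[i], v2[i]) on two
-- lists of ints takes the all-int branch and is a direct equality, inlined as '=='.
def isEqualA (v1 v2 : List (List Int)) : Bool :=
  if (v1.all fun _ => false) && (v2.all fun _ => false) then
    v1 == v2
  else if v1.length ≠ v2.length then
    false
  else
    -- 'for perm in permutations(v1): if all(is_equal(perm[i], v2[i]) for i in range(len(v1)))'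
    v1.permutations.any fun p =>
      (List.range v1.length).all fun i => (p.getD i []) == (v2.getD i [])

-- 'for u in L: if is_equal(v, u[0]): return u[1]' / 'return 0'
def mCoeffLoopA (v : List (List Int)) : List (List (List Int) × Int) → Int
  | [] => 0
  | u :: rest => if isEqualA v u.1 then u.2 else mCoeffLoopA v rest

def mCoeff (v : List (List Int)) (L : List (List (List Int) × Int)) : Int :=
  mCoeffLoopA v L

-- ===== PORT B =====
-- 'for m, c in L: if sorted(m) == key: return c' / 'return 0'
def mCoeffLoopB (key : List (List Int)) : List (List (List Int) × Int) → Int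
  | [] => 0
  | (m, c) :: rest =>
      if (PySem.List.sorted m (fun x => x) false) == key then c else mCoeffLoopB key rest

def mCoeff_alt (v : List (List Int)) (L : List (List (List Int) × Int)) : Int :=
  let key := PySem.List.sorted v (fun x => x) false   -- key = sorted(v)
  mCoeffLoopB key L

-- ===== PRECONDITION & SPEC =====
def Spec_mCoeff (v : List (List Int)) (L : List (List (List Int) × Int)) (out : Int) : Prop := out = mCoeff_alt v L
instance (v : List (List Int)) (L : List (List (List Int) × Int)) (out : Int) : Decidable (Spec_mCoeff v L out) := by unfold Spec_mCoeff; infer_instance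

-- ===== CLAIM (what is proved, stated in full; the proofs are below) =====
def Claim_equal_mCoeff : Prop := ∀ (v : List (List Int)) (L : List (List (List Int) × Int)), Dom_mCoeff v L → Spec_mCoeff v L (mCoeff v L)

-- ===== LEMMAS AND PROOFS =====

-- The generator's pointwise index test, under equal lengths, is list equality.
theorem pointwise_iff (p v2 : List (List Int)) (hlen : p.length = v2.length) :
    ((List.range p.length).all fun i => (p.getD i []) == (v2.getD i [])) = true ↔ p = v2 := by
  constructor
  · intro h
    apply List.ext_getElem hlen
    intro i h1 h2
    have hi := (List.all_eq_true.mp h) i (List.mem_range.mpr h1)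
    rw [List.getD_eq_getElem _ _ h1, List.getD_eq_getElem _ _ h2] at hi
    exact beq_iff_eq.mp hi
  · rintro rfl
    simp

-- A's permutation test is multiset equality.
theorem isEqualA_iff (v1 v2 : List (List Int)) : isEqualA v1 v2 = true ↔ v1.Perm v2 := by
  unfold isEqualA
  split_ifs with h1 h2
  · -- both lists have only "ints": both are empty
    obtain ⟨ha, hb⟩ := Bool.and_eq_true_iff.mp h1
    have hva : v1 = [] := by
      cases v1 with
      | nil => rfl
      | cons x xs => simp at ha
    have hvb : v2 = [] := by
      cases v2 with
      | nil => rfl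
      | cons x xs => simp at hb
    subst hva; subst hvb; simp
  · -- lengths differ: no permutation can match
    simp only [false_iff]
    intro hperm
    exact h2 hperm.length_eq
  · -- lengths equal: some permutation matches pointwise iff v2 is a permutation of v1
    have hlen : v1.length = v2.length := by omega
    rw [List.any_eq_true]
    constructor
    · rintro ⟨p, hp, hpred⟩
      have hperm : p.Perm v1 := List.mem_permutations.mp hp
      have hplen : p.length = v2.length := hperm.length_eq.trans hlen
      have hrange : v1.length = p.length := hperm.length_eq.symm
      rw [hrange] at hpred
      have : p = v2 := (pointwise_iff p v2 hplen).mp hpred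
      exact (this ▸ hperm).symm
    · intro hperm
      refine ⟨v2, List.mem_permutations.mpr hperm.symm, ?_⟩
      simp

-- The port's inferred order on List Int (core List.lt) and Mathlib's lexicographic
-- LinearOrder agree, so the sorted-form lemma applies.
theorem sorted_irrel (m : List (List Int)) :
    @PySem.List.sorted (List Int) (List Int) List.instLT (fun a b => a.decidableLT b) m (fun x => x) false
      = @PySem.List.sorted (List Int) (List Int) List.instLinearOrder.toLT LinearOrder.toDecidableLT m (fun x => x) false := by
  congr 1

-- B's canonical-form test decides the same relation: equal sorted forms = permutation.
theorem sorted_id_iff (m v : List (List Int)) :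
    ((PySem.List.sorted m (fun x => x) false) == (PySem.List.sorted v (fun x => x) false)) = true ↔ m.Perm v := by
  rw [beq_iff_eq, sorted_irrel m, sorted_irrel v]
  exact PySem.List.sorted_id_eq_sorted_id_iff_perm m v

theorem pred_eq (v m : List (List Int)) :
    isEqualA v m = ((PySem.List.sorted m (fun x => x) false) == (PySem.List.sorted v (fun x => x) false)) := by
  rcases h : isEqualA v m with _ | _
  · rcases hs : ((PySem.List.sorted m (fun x => x) false) == (PySem.List.sorted v (fun x => x) false)) with _ | _
    · rfl
    · have := ((sorted_id_iff m v).mp hs).symm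
      rw [(isEqualA_iff v m).mpr this] at h
      cases h
  · exact ((sorted_id_iff m v).mpr ((isEqualA_iff v m).mp h).symm).symm

theorem loops_eq (v : List (List Int)) (L : List (List (List Int) × Int)) :
    mCoeffLoopA v L = mCoeffLoopB (PySem.List.sorted v (fun x => x) false) L := by
  induction L with
  | nil => rfl
  | cons u rest ih =>
      obtain ⟨m, c⟩ := u
      simp only [mCoeffLoopA, mCoeffLoopB, pred_eq v m, ih]

-- ===== VERDICT (by name: the statement is the Claim_ definition above) =====
theorem mCoeff_spec : Claim_equal_mCoeff := by
  intro v L _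
  unfold Spec_mCoeff mCoeff mCoeff_alt
  exact loops_eq v L
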